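-- pv_equiv track=rewrite | github.com/pvestal/tower-echo-brain | services/google_takeout/omniscient_data_collector.py | _categorize_website
-- ===== SOURCE A (Python) =====
-- def _categorize_website(domain: str, url: str) -> str:
--     """Categorize website by domain/URL"""
--     if "social" in domain or any(social in domain for social in ["facebook", "twitter", "instagram", "reddit"]):
--         return "social_media"
--     elif "shopping" in domain or any(shop in domain for shop in ["amazon", "ebay", "shop"]):
--         return "shopping"
--     elif "news" in domain or any(news in domain for news in ["cnn", "bbc", "news"]):
--         return "news"
--     elif "google" in domain and "search" in url:
--         return "search"
--     else:
--         return "general"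
-- ===== SOURCE B (Python) =====
-- KEYWORD_CAT = [
--     ("social", "social_media"), ("facebook", "social_media"), ("twitter", "social_media"),
--     ("instagram", "social_media"), ("reddit", "social_media"),
--     ("shopping", "shopping"), ("amazon", "shopping"), ("ebay", "shopping"), ("shop", "shopping"),
--     ("news", "news"), ("cnn", "news"), ("bbc", "news"),
-- ]
-- PRIORITY = {"social_media": 0, "shopping": 1, "news": 2}
--
-- def _categorize_website(domain: str, url: str) -> str:
--     # Collect ALL categories with a matching keyword, then pick the highest-priority one.
--     matched = [cat for kw, cat in KEYWORD_CAT if kw in domain]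
--     if matched:
--         return min(matched, key=PRIORITY.__getitem__)
--     if "google" in domain and "search" in url:
--         return "search"
--     return "general"
-- ===== Notes on version B (the rewrite author's own statement) =====
-- stated objective: alternative
-- what changed: Instead of A's short-circuiting first-match if-elif ladder, B first collects the list of ALL categories whose keywords occur in the domain (one comprehension over a flat keyword->category table) and then selects the highest-priority one with min over a priority dict; the google/search check stays as a post-pass fallback.
import Mathlib
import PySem

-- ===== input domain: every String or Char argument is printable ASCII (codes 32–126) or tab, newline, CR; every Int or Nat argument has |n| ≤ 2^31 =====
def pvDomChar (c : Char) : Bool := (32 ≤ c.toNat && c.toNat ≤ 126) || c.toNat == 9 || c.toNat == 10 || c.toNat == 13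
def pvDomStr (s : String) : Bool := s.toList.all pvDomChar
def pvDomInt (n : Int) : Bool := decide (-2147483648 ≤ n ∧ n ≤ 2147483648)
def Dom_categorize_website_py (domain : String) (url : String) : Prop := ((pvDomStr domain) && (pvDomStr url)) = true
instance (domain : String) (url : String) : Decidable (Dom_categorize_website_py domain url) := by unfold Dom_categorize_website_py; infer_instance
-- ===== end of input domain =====

-- B collects the set of ALL matching categories and selects the best by a priority key (min), instead of A's first-match if-elif ladder; same cost, different decomposition.


-- ===== PORT A =====
def categorize_website_py (domain : String) (url : String) : String :=
  if PySem.Str.isIn "social" domain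
      || (["facebook", "twitter", "instagram", "reddit"].any fun social => PySem.Str.isIn social domain) then
    "social_media"
  else if PySem.Str.isIn "shopping" domain
      || (["amazon", "ebay", "shop"].any fun shop => PySem.Str.isIn shop domain) then
    "shopping"
  else if PySem.Str.isIn "news" domain
      || (["cnn", "bbc", "news"].any fun news => PySem.Str.isIn news domain) then
    "news"
  else if PySem.Str.isIn "google" domain && PySem.Str.isIn "search" url then
    "search"
  else
    "general"

-- ===== PORT B =====
def pvKeywordCat : List (String × String) :=
  [("social", "social_media"), ("facebook", "social_media"), ("twitter", "social_media"),
   ("instagram", "social_media"), ("reddit", "social_media"),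
   ("shopping", "shopping"), ("amazon", "shopping"), ("ebay", "shopping"), ("shop", "shopping"),
   ("news", "news"), ("cnn", "news"), ("bbc", "news")]

def pvPriority : PySem.Dict String Int := PySem.Dict.ofList [("social_media", 0), ("shopping", 1), ("news", 2)]

-- PRIORITY[c]; the dict lookup is total here because min's key is only applied to members of
-- matched, all of which are category names present in pvPriority (getD's default is never used).
def pvPriorityKey (c : String) : Int := (PySem.Dict.get? pvPriority c).getD 0

def categorize_website_py_alt (domain : String) (url : String) : String :=
  -- matched = [cat for kw, cat in KEYWORD_CAT if kw in domain];
  -- 'if matched: return min(matched, key=…)' — min? is none exactly when matched is empty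
  match PySem.List.min?
      (pvKeywordCat.filterMap fun p =>
        if PySem.Str.isIn p.1 domain then some p.2 else none)
      pvPriorityKey with
  | some m => m
  | none =>
      if PySem.Str.isIn "google" domain && PySem.Str.isIn "search" url then "search"
      else "general"

-- ===== PRECONDITION & SPEC =====
def Spec_categorize_website_py (domain : String) (url : String) (out : String) : Prop := out = categorize_website_py_alt domain url
instance (domain : String) (url : String) (out : String) : Decidable (Spec_categorize_website_py domain url out) := by unfold Spec_categorize_website_py; infer_instance

-- ===== CLAIM (what is proved, stated in full; the proofs are below) =====
def Claim_equal_categorize_website_py : Prop := ∀ (domain : String) (url : String), Dom_categorize_website_py domain url → Spec_categorize_website_py domain url (categorize_website_py domain url)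

-- ===== LEMMAS AND PROOFS =====

-- The selected minimum over the matched-category list, as a function of the twelve
-- keyword-match booleans (checked by the kernel over all 2^12 cases).
set_option maxHeartbeats 4000000 in
theorem pv_min_matched (f : String → Bool) :
    PySem.List.min?
        (pvKeywordCat.filterMap fun p => if f p.1 then some p.2 else none) pvPriorityKey
    = if f "social" || f "facebook" || f "twitter" || f "instagram" || f "reddit" then some "social_media"
      else if f "shopping" || f "amazon" || f "ebay" || f "shop" then some "shopping"
      else if f "news" || f "cnn" || f "bbc" then some "news"
      else none := by
  unfold pvKeywordCat
  simp only [List.filterMap_cons, List.filterMap_nil]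
  generalize f "social" = b1
  generalize f "facebook" = b2
  generalize f "twitter" = b3
  generalize f "instagram" = b4
  generalize f "reddit" = b5
  generalize f "shopping" = b6
  generalize f "amazon" = b7
  generalize f "ebay" = b8
  generalize f "shop" = b9
  generalize f "news" = b10
  generalize f "cnn" = b11
  generalize f "bbc" = b12
  revert b1 b2 b3 b4 b5 b6 b7 b8 b9 b10 b11 b12
  decide

-- ===== VERDICT (by name: the statement is the Claim_ definition above) =====
set_option maxHeartbeats 1000000 in
theorem categorize_website_py_spec : Claim_equal_categorize_website_py := by
  intro domain url _
  unfold Spec_categorize_website_py categorize_website_py categorize_website_py_alt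
  rw [pv_min_matched (fun s => PySem.Str.isIn s domain)]
  simp only [List.any_cons, List.any_nil, Bool.or_false, Bool.or_assoc]
  generalize PySem.Str.isIn "social" domain = b1
  generalize PySem.Str.isIn "facebook" domain = b2
  generalize PySem.Str.isIn "twitter" domain = b3
  generalize PySem.Str.isIn "instagram" domain = b4
  generalize PySem.Str.isIn "reddit" domain = b5
  generalize PySem.Str.isIn "shopping" domain = b6
  generalize PySem.Str.isIn "amazon" domain = b7
  generalize PySem.Str.isIn "ebay" domain = b8
  generalize PySem.Str.isIn "shop" domain = b9
  generalize PySem.Str.isIn "news" domain = b10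
  generalize PySem.Str.isIn "cnn" domain = b11
  generalize PySem.Str.isIn "bbc" domain = b12
  generalize PySem.Str.isIn "google" domain = b13
  generalize PySem.Str.isIn "search" url = b14
  revert b1 b2 b3 b4 b5 b6 b7 b8 b9 b10 b11 b12 b13 b14
  decide
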